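-- pv_equiv track=rewrite | github.com/NazarenOMICS/Programming-Coursework-Projects | Obligatorios del curso/Obligatorio 1/OBLIGATORIO 1 Nazareno Cabrera y Gaston Silva.py | parejas
-- ===== SOURCE A (Python) =====
-- def parejas(secuencia):
--     # Inicializar la matriz de parejas
--     matriz_parejas = [[0]*4 for _ in range(4)]
--     bases = "ACTG"
--
--     # Recorrer la secuencia y contar las parejas
--     for x in range(len(secuencia) - 1):
--         base1 = secuencia[x]
--         base2 = secuencia[x + 1]
--
--         # Obtener los índices de las bases en la matriz
--         index1 = bases.index(base1)
--         index2 = bases.index(base2)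
--
--         # Incrementar el conteo de parejas en la matriz
--         matriz_parejas[index1][index2] += 1
--
--     return matriz_parejas
-- ===== SOURCE B (Python) =====
-- def parejas(secuencia):
--     # Phase 1: tabulate adjacent-pair frequencies in one scan.
--     conteo = {}
--     for par in zip(secuencia, secuencia[1:]):
--         conteo[par] = conteo.get(par, 0) + 1
--     # Phase 2: emit the fixed 4x4 matrix by reading the table.
--     bases = "ACTG"
--     return [[conteo.get((b1, b2), 0) for b2 in bases] for b1 in bases]
-- ===== Notes on version B (the rewrite author's own statement) =====
-- stated objective: alternative
-- what changed: A increments cells of a pre-built 4x4 matrix while scanning indices; B first tabulates adjacent-pair frequencies into a dict over zip(secuencia, secuencia[1:]) and then emits the matrix as a separate fixed 16-cell comprehension reading the table (B also returns the ACTG-pair counts where A raises ValueError on a non-ACTG character).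
import Mathlib
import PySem

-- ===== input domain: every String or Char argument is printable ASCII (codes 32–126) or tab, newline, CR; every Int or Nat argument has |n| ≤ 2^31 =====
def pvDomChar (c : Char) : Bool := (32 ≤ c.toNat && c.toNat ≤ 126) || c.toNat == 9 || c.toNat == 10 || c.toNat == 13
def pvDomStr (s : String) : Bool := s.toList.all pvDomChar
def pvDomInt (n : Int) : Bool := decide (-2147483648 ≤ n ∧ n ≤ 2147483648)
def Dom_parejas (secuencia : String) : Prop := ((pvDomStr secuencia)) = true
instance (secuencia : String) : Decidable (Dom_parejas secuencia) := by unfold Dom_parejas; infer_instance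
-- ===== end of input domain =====

-- B restructures A: one tabulation pass into a dict of adjacent-pair counts, then a separate
-- fixed 16-cell emission pass reading the table; same return value on every input in Pre_.

-- ===== PORT A =====
-- 'ACTG'.index c; .getD 0 is never reached under Pre_ (Python raises ValueError there)
def pvIdxA (c : Char) : Nat := (PySem.List.index? ['A', 'C', 'T', 'G'] c).getD 0

def parejas (secuencia : String) : List (List Int) :=
  let cs := secuencia.toList
  (PySem.List.pyRange 0 ((cs.length : Int) - 1) 1).foldl
    (fun m x =>
      let base1 := PySem.List.pyGetD cs x 'A'      -- in range for every x in the loop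
      let base2 := PySem.List.pyGetD cs (x + 1) 'A'
      m.modify (pvIdxA base1) (fun row => row.modify (pvIdxA base2) (· + 1)))
    [[0, 0, 0, 0], [0, 0, 0, 0], [0, 0, 0, 0], [0, 0, 0, 0]]

-- ===== PORT B =====
def parejas_alt (secuencia : String) : List (List Int) :=
  let cs := secuencia.toList
  let conteo := (cs.zip (cs.drop 1)).foldl
    (fun d p => d.insert p (d.getD p 0 + 1)) (PySem.Dict.empty)
  (['A', 'C', 'T', 'G'] : List Char).map (fun b1 =>
    (['A', 'C', 'T', 'G'] : List Char).map (fun b2 => conteo.getD (b1, b2) 0))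

-- ===== PRECONDITION & SPEC =====
-- Pre_ excludes exactly the inputs where A raises ValueError: length ≥ 2 with a non-ACTG character.
def Pre_parejas (secuencia : String) : Prop :=
  secuencia.toList.length ≤ 1 ∨ ∀ c ∈ secuencia.toList, c ∈ (['A', 'C', 'T', 'G'] : List Char)
instance (secuencia : String) : Decidable (Pre_parejas secuencia) := by
  unfold Pre_parejas; infer_instance
def pvWitness_parejas : String := "A"

def Spec_parejas (secuencia : String) (out : List (List Int)) : Prop := out = parejas_alt secuencia
instance (secuencia : String) (out : List (List Int)) : Decidable (Spec_parejas secuencia out) := by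
  unfold Spec_parejas; infer_instance

-- ===== CLAIM (what is proved, stated in full; the proofs are below) =====
def Claim_equal_parejas : Prop := ∀ (secuencia : String), Dom_parejas secuencia → Pre_parejas secuencia → Spec_parejas secuencia (parejas secuencia)

-- ===== LEMMAS AND PROOFS =====

-- the index loop of A reads exactly the adjacent pairs of cs
theorem pv_pairs_eq (cs : List Char) (d : Char) :
    (List.range (cs.length - 1)).map
      (fun x => (cs.getD x d, cs.getD (x + 1) d)) = cs.zip (cs.drop 1) := by
  induction cs with
  | nil => simp
  | cons c cs ih =>
    cases cs with
    | nil => simp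
    | cons c' cs' =>
      simp only [List.length_cons, Nat.add_sub_cancel, List.range_succ_eq_map,
        List.map_cons, List.map_map] at ih ⊢
      refine congrArg₂ _ (by simp) ?_
      rw [show (c' :: cs').zip (List.drop 1 (c' :: cs')) =
            List.zipWith Prod.mk (c' :: cs') cs' from rfl] at ih
      rw [← ih]
      simp [Function.comp_def]

def pvStep (m : List (List Int)) (p : Char × Char) : List (List Int) :=
  m.modify (pvIdxA p.1) (fun row => row.modify (pvIdxA p.2) (· + 1))

def pvCntMat (P : List (Char × Char)) : List (List Int) :=
  (['A', 'C', 'T', 'G'] : List Char).map (fun b1 =>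
    (['A', 'C', 'T', 'G'] : List Char).map (fun b2 => (P.count (b1, b2) : Int)))

theorem pv_fold_cnt (P : List (Char × Char))
    (h : ∀ p ∈ P, p.1 ∈ (['A', 'C', 'T', 'G'] : List Char) ∧ p.2 ∈ (['A', 'C', 'T', 'G'] : List Char)) :
    P.foldl pvStep [[0, 0, 0, 0], [0, 0, 0, 0], [0, 0, 0, 0], [0, 0, 0, 0]] = pvCntMat P := by
  induction P using List.reverseRecOn with
  | nil => simp [pvCntMat]
  | append_singleton P p ih =>
    have hP : ∀ q ∈ P, q.1 ∈ (['A', 'C', 'T', 'G'] : List Char) ∧ q.2 ∈ (['A', 'C', 'T', 'G'] : List Char) :=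
      fun q hq => h q (by simp [hq])
    have hp := h p (by simp)
    rw [List.foldl_append, ih hP]
    obtain ⟨a, b⟩ := p
    obtain ⟨ha, hb⟩ := hp
    simp only [List.mem_cons, List.not_mem_nil, or_false] at ha hb
    rcases ha with rfl | rfl | rfl | rfl <;> rcases hb with rfl | rfl | rfl | rfl <;>
      simp [pvStep, pvCntMat, List.count_append, List.count_cons, Prod.ext_iff,
        show pvIdxA 'A' = 0 from by decide, show pvIdxA 'C' = 1 from by decide,
        show pvIdxA 'T' = 2 from by decide, show pvIdxA 'G' = 3 from by decide,
        List.modify, List.modifyTailIdx, List.modifyTailIdx.go, List.modifyHead]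

theorem pv_A_eq_fold (secuencia : String) :
    parejas secuencia =
      (secuencia.toList.zip (secuencia.toList.drop 1)).foldl pvStep
        [[0, 0, 0, 0], [0, 0, 0, 0], [0, 0, 0, 0], [0, 0, 0, 0]] := by
  simp only [parejas]
  rw [PySem.List.pyRange_one,
    show (((secuencia.toList.length : Int) - 1) - 0).toNat = secuencia.toList.length - 1 from by omega,
    List.foldl_map, ← pv_pairs_eq secuencia.toList 'A', List.foldl_map]
  congr 1
  funext m x
  simp only [zero_add, pvStep]
  rw [show ((x : Int) + 1) = (((x + 1 : Nat)) : Int) from by push_cast; ring]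
  simp only [PySem.List.pyGetD_natCast]

theorem pv_B_eq_cnt (secuencia : String) :
    parejas_alt secuencia = pvCntMat (secuencia.toList.zip (secuencia.toList.drop 1)) := by
  unfold parejas_alt pvCntMat
  simp only [PySem.Dict.foldl_insert_getD_add_one_eq_counter, PySem.Dict.getD_counter]

-- ===== VERDICT (by name: the statement is the Claim_ definition above) =====
theorem parejas_spec : Claim_equal_parejas := by
  intro s _ hpre
  unfold Spec_parejas
  rw [pv_A_eq_fold, pv_B_eq_cnt]
  apply pv_fold_cnt
  intro p hp
  rcases hpre with hlen | hall
  · exfalso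
    have hnil : s.toList.zip (s.toList.drop 1) = [] := by
      match hcs : s.toList, hlen with
      | [], _ => simp
      | [c], _ => simp
    rw [hnil] at hp
    exact List.not_mem_nil hp
  · obtain ⟨h1, h2⟩ := List.of_mem_zip hp
    exact ⟨hall _ h1, hall _ (List.mem_of_mem_drop h2)⟩
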